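-- pv_equiv track=rewrite | github.com/parmsam/familyview | tree.py | _acyclic_edges
-- ===== SOURCE A (Python) =====
-- def _acyclic_edges(raw_edges: list[tuple]) -> list[tuple]:
--     """
--     Filter parent-child edges to remove any that would create a cycle.
--     Uses DFS reachability: skip edge (parent→child) if child can already
--     reach parent through previously accepted edges.
--     """
--     children_of: dict = {}
--
--     def reachable(start, target, visited):
--         if start == target:
--             return True
--         if start in visited:
--             return False
--         visited.add(start)
--         return any(reachable(c, target, visited) for c in children_of.get(start, []))
--
--     good = []
--     for (parent_id, child_id) in raw_edges:
--         if not reachable(child_id, parent_id, set()):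
--             good.append((parent_id, child_id))
--             children_of.setdefault(parent_id, []).append(child_id)
--         # else: silently skip — would create a cycle
--     return good
-- ===== SOURCE B (Python) =====
-- def _acyclic_edges(raw_edges: list[tuple]) -> list[tuple]:
--     """
--     Filter parent-child edges to remove any that would create a cycle.
--     Incremental transitive closure: reach[u] is the set of nodes reachable
--     from u via >=1 accepted edge, so the cycle test is a single set lookup
--     instead of a DFS.
--     """
--     reach: dict = {}
--     good = []
--     for (parent_id, child_id) in raw_edges:
--         if parent_id == child_id or parent_id in reach.get(child_id, set()):
--             continue  # would create a cycle
--         good.append((parent_id, child_id))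
--         new = {child_id} | reach.get(child_id, set())
--         reach = {u: (s | new) if parent_id in s else s for u, s in reach.items()}
--         reach[parent_id] = reach.get(parent_id, set()) | new
--     return good
-- ===== Notes on version B (the rewrite author's own statement) =====
-- stated objective: alternative
-- what changed: Replaces A's per-edge recursive DFS over a children adjacency dict by an incrementally maintained transitive-closure dict reach[u] = descendants of u, so the cycle test becomes a single set-membership lookup and accepting an edge updates the closure by set unions; no graph search at all.
import Mathlib
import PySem

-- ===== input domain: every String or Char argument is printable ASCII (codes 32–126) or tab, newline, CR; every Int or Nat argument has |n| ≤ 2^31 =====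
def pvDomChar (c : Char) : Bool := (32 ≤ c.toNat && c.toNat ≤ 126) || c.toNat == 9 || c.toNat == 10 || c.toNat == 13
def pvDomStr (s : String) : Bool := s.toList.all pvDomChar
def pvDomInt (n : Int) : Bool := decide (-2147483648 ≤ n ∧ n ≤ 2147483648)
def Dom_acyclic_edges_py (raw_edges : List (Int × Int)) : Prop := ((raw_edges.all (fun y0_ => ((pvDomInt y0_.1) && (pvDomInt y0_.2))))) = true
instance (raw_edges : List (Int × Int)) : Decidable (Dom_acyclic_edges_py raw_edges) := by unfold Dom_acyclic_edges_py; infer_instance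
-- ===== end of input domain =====

-- B replaces A's per-edge recursive DFS over a children adjacency dict by an incrementally
-- maintained transitive-closure dict (reach[u] = descendants of u), so the cycle test is one
-- set lookup; the return value is proved identical.
-- (A's port guards its DFS with a fuel parameter large enough to never be exhausted; this only
-- makes the recursion total.)

-- ===== PORT A =====
-- fuel bound: strictly more than the number of node occurrences stored in the dict, plus one for the start node
def pvFuel (g : PySem.Dict Int (List Int)) : Nat :=
  (g.items.map (fun p => p.2.length + 1)).sum + 2

-- reachable(start, target, visited) of A: the mutated Python set `visited` is threaded as the second component
def pvReachA (g : PySem.Dict Int (List Int)) (target : Int) :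
    Nat → Int → PySem.Set Int → Bool × PySem.Set Int
  | 0, _, vis => (false, vis)
  | fuel+1, start, vis =>
    if start = target then (true, vis)
    else if start ∈ vis then (false, vis)
    else (g.getD start []).foldl
      (fun p c => if p.1 then p else pvReachA g target fuel c p.2)
      (false, PySem.Set.add vis start)

def acyclic_edges_py (raw_edges : List (Int × Int)) : List (Int × Int) :=
  (raw_edges.foldl
    (fun (st : List (Int × Int) × PySem.Dict Int (List Int)) e =>
      if (pvReachA st.2 e.1 (pvFuel st.2) e.2 PySem.Set.empty).1 = false
      then (st.1 ++ [e], st.2.modify e.1 [] (fun l => l ++ [e.2]))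
      else st)
    ([], PySem.Dict.empty)).1

-- ===== PORT B =====
-- the two closure-update lines of B: rebuild the dict extending every set that contains p,
-- then reach[p] = reach.get(p, set()) | new
def pvCloseStep (reach : PySem.Dict Int (PySem.Set Int)) (p c : Int) :
    PySem.Dict Int (PySem.Set Int) :=
  let nw := PySem.Set.union (PySem.Set.add PySem.Set.empty c) (reach.getD c PySem.Set.empty)
  let r1 := PySem.Dict.mk (reach.items.map
    (fun us => (us.1, if p ∈ us.2 then PySem.Set.union us.2 nw else us.2)))
  r1.insert p (PySem.Set.union (r1.getD p PySem.Set.empty) nw)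

def acyclic_edges_py_alt (raw_edges : List (Int × Int)) : List (Int × Int) :=
  (raw_edges.foldl
    (fun (st : List (Int × Int) × PySem.Dict Int (PySem.Set Int)) e =>
      if e.1 = e.2 ∨ e.1 ∈ st.2.getD e.2 PySem.Set.empty then st
      else (st.1 ++ [e], pvCloseStep st.2 e.1 e.2))
    ([], PySem.Dict.empty)).1

-- ===== PRECONDITION & SPEC =====
def Spec_acyclic_edges_py (raw_edges : List (Int × Int)) (out : List (Int × Int)) : Prop := out = acyclic_edges_py_alt raw_edges
instance (raw_edges : List (Int × Int)) (out : List (Int × Int)) : Decidable (Spec_acyclic_edges_py raw_edges out) := by unfold Spec_acyclic_edges_py; infer_instance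

-- ===== CLAIM (what is proved, stated in full; the proofs are below) =====
def Claim_equal_acyclic_edges_py : Prop := ∀ (raw_edges : List (Int × Int)), Dom_acyclic_edges_py raw_edges → Spec_acyclic_edges_py raw_edges (acyclic_edges_py raw_edges)

-- ===== LEMMAS AND PROOFS =====

-- reachability in the directed graph `g` (edge x → c iff c ∈ g[x])
inductive pvReaches (g : PySem.Dict Int (List Int)) : Int → Int → Prop
  | refl (a : Int) : pvReaches g a a
  | step {a b c : Int} : b ∈ g.getD a [] → pvReaches g b c → pvReaches g a c

lemma pvReaches_trans {g : PySem.Dict Int (List Int)} {a b c : Int}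
    (h1 : pvReaches g a b) (h2 : pvReaches g b c) : pvReaches g a c := by
  induction h1 with
  | refl => exact h2
  | step hmem _ ih => exact .step hmem (ih h2)

-- all node occurrences of g, as a Finset
def pvNodes (g : PySem.Dict Int (List Int)) : Finset Int :=
  (g.items.flatMap (fun p => p.1 :: p.2)).toFinset

lemma pvNodes_closed (g : PySem.Dict Int (List Int)) (x c : Int)
    (h : c ∈ g.getD x []) : c ∈ pvNodes g := by
  unfold pvNodes
  unfold PySem.Dict.getD at h
  cases hg : g.get? x with
  | none => rw [hg] at h; simp at h
  | some vs =>
    rw [hg] at h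
    simp only [Option.getD_some] at h
    have hm := PySem.Dict.mem_items_of_get?_eq_some g hg
    simp only [List.mem_toFinset, List.mem_flatMap]
    exact ⟨(x, vs), hm, by simp [h]⟩

-- a set with no edge leaving it and not containing t cannot reach t
lemma pv_closed_no_reach (g : PySem.Dict Int (List Int)) (t : Int) (w : List Int)
    (hw : ∀ x ∈ w, x ≠ t ∧ ∀ c ∈ g.getD x [], c ∈ w) :
    ∀ x, pvReaches g x t → x ∉ w := by
  intro x hx
  induction hx with
  | refl a => intro ha; exact (hw a ha).1 rfl
  | step hmem _ ih => intro ha; exact ih hw (((hw _ ha).2 _ hmem))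

-- "visited grew from v to v', and every new element is fully explored and is not t"
def pvGood (g : PySem.Dict Int (List Int)) (t : Int) (v v' : List Int) : Prop :=
  v ⊆ v' ∧ ∀ x ∈ v', x ∈ v ∨ (x ≠ t ∧ ∀ c ∈ g.getD x [], c ∈ v')

lemma pvGood_trans {g t} {v w w' : List Int} (h1 : pvGood g t v w) (h2 : pvGood g t w w') :
    pvGood g t v w' := by
  refine ⟨fun x hx => h2.1 (h1.1 hx), fun x hx => ?_⟩
  rcases h2.2 x hx with h | h
  · rcases h1.2 x h with h' | h'
    · exact Or.inl h'
    · exact Or.inr ⟨h'.1, fun c hc => h2.1 (h'.2 c hc)⟩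
  · exact Or.inr h

lemma pv_foldA_true (g : PySem.Dict Int (List Int)) (t : Int) (fuel : Nat) :
    ∀ (cs : List Int) (w : PySem.Set Int),
      cs.foldl (fun p c => if p.1 then p else pvReachA g t fuel c p.2) (true, w) = (true, w) := by
  intro cs
  induction cs with
  | nil => intro w; rfl
  | cons c cs ih => intro w; simpa using ih w

lemma pvReachA_sound (g : PySem.Dict Int (List Int)) (t : Int) :
    ∀ (fuel : Nat) (s : Int) (v : PySem.Set Int),
      (pvReachA g t fuel s v).1 = true → pvReaches g s t := by
  intro fuel
  induction fuel with
  | zero => intro s v h; simp [pvReachA] at h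
  | succ fuel ih =>
    intro s v h
    rw [pvReachA] at h
    by_cases h1 : s = t
    · subst h1; exact .refl _
    · rw [if_neg h1] at h
      by_cases h2 : s ∈ v
      · simp [h2] at h
      · rw [if_neg h2] at h
        have aux : ∀ cs : List Int, (∀ c ∈ cs, c ∈ g.getD s []) → ∀ w : PySem.Set Int,
            (cs.foldl (fun p c => if p.1 then p else pvReachA g t fuel c p.2) (false, w)).1 = true →
            pvReaches g s t := by
          intro cs
          induction cs with
          | nil => intro _ w hw; simp at hw
          | cons c cs ihc =>
            intro hmem w hw
            have hrw : (c :: cs).foldl (fun p c => if p.1 then p else pvReachA g t fuel c p.2) (false, w)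
                = cs.foldl (fun p c => if p.1 then p else pvReachA g t fuel c p.2) (pvReachA g t fuel c w) := rfl
            rw [hrw] at hw
            cases hb : pvReachA g t fuel c w with
            | mk b w' =>
              rw [hb] at hw
              cases b with
              | true =>
                exact .step (hmem c (by simp)) (ih c w (by rw [hb]))
              | false =>
                exact ihc (fun d hd => hmem d (by simp [hd])) w' hw
        exact aux _ (fun c hc => hc) _ h

lemma pvReachA_false (g : PySem.Dict Int (List Int)) (t : Int) (U : Finset Int)
    (hU : ∀ x c, c ∈ g.getD x [] → c ∈ U) :
    ∀ (fuel : Nat) (s : Int) (v : PySem.Set Int), s ∈ U →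
      1 + (U.filter (fun x => x ∉ v)).card ≤ fuel →
      (pvReachA g t fuel s v).1 = false →
      s ∈ (pvReachA g t fuel s v).2 ∧ pvGood g t v (pvReachA g t fuel s v).2 := by
  intro fuel
  induction fuel with
  | zero => intro s v hs hf h; omega
  | succ fuel ih =>
    intro s v hs hf h
    rw [pvReachA] at h ⊢
    by_cases h1 : s = t
    · rw [if_pos h1] at h; exact absurd h (by simp)
    · rw [if_neg h1] at h ⊢
      by_cases h2 : s ∈ v
      · rw [if_pos h2] at h ⊢
        exact ⟨h2, List.Subset.refl _, fun x hx => Or.inl hx⟩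
      · rw [if_neg h2] at h ⊢
        have hsub_add : v ⊆ PySem.Set.add v s := by
          intro x hx; exact (PySem.Set.mem_add v s x).2 (Or.inl hx)
        have hs_add : s ∈ PySem.Set.add v s := (PySem.Set.mem_add v s s).2 (Or.inr rfl)
        have card_lt : (U.filter (fun x => x ∉ PySem.Set.add v s)).card + 1 ≤ (U.filter (fun x => x ∉ v)).card := by
          have hss : (U.filter (fun x => x ∉ PySem.Set.add v s)) ⊂ (U.filter (fun x => x ∉ v)) := by
            constructor
            · intro x hx
              simp only [Finset.mem_filter] at hx ⊢
              exact ⟨hx.1, fun hv => hx.2 (hsub_add hv)⟩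
            · intro hcon
              have := hcon (Finset.mem_filter.2 ⟨hs, h2⟩)
              simp only [Finset.mem_filter] at this
              exact this.2 hs_add
          exact Finset.card_lt_card hss
        have aux : ∀ cs : List Int, (∀ c ∈ cs, c ∈ U) → ∀ w : PySem.Set Int,
            PySem.Set.add v s ⊆ w →
            (cs.foldl (fun p c => if p.1 then p else pvReachA g t fuel c p.2) (false, w)).1 = false →
            pvGood g t w (cs.foldl (fun p c => if p.1 then p else pvReachA g t fuel c p.2) (false, w)).2 ∧
              ∀ c ∈ cs, c ∈ (cs.foldl (fun p c => if p.1 then p else pvReachA g t fuel c p.2) (false, w)).2 := by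
          intro cs
          induction cs with
          | nil =>
            intro _ w _ _
            exact ⟨⟨List.Subset.refl _, fun x hx => Or.inl hx⟩, by simp⟩
          | cons c cs ihc =>
            intro hmem w hw hres
            have hrw : (c :: cs).foldl (fun p c => if p.1 then p else pvReachA g t fuel c p.2) (false, w)
                = cs.foldl (fun p c => if p.1 then p else pvReachA g t fuel c p.2) (pvReachA g t fuel c w) := rfl
            rw [hrw] at hres ⊢
            cases hb : pvReachA g t fuel c w with
            | mk b w1 =>
              cases b with
              | true =>
                rw [hb] at hres
                rw [pv_foldA_true] at hres
                simp at hres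
              | false =>
                rw [hb] at hres
                have hfw : 1 + (U.filter (fun x => x ∉ w)).card ≤ fuel := by
                  have hanti : (U.filter (fun x => x ∉ w)).card ≤ (U.filter (fun x => x ∉ PySem.Set.add v s)).card := by
                    apply Finset.card_le_card
                    intro x hx
                    simp only [Finset.mem_filter] at hx ⊢
                    exact ⟨hx.1, fun hv => hx.2 (hw hv)⟩
                  omega
                have hihc := ih c w (hmem c (by simp)) hfw (by rw [hb])
                rw [hb] at hihc
                obtain ⟨hc_w1, hgood_w1⟩ := hihc
                have hadd_w1 : PySem.Set.add v s ⊆ w1 := fun x hx => hgood_w1.1 (hw hx)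
                obtain ⟨hgood_rest, hmem_rest⟩ :=
                  ihc (fun d hd => hmem d (by simp [hd])) w1 hadd_w1 hres
                refine ⟨pvGood_trans hgood_w1 hgood_rest, ?_⟩
                intro d hd
                rcases List.mem_cons.1 hd with hd | hd
                · exact hgood_rest.1 (hd ▸ hc_w1)
                · exact hmem_rest d hd
        obtain ⟨hgood, hmemc⟩ := aux (g.getD s []) (fun c hc => hU s c hc) (PySem.Set.add v s) (List.Subset.refl _) h
        refine ⟨hgood.1 hs_add, ?_, ?_⟩
        · intro x hx; exact hgood.1 (hsub_add hx)
        · intro x hx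
          rcases hgood.2 x hx with hadd | hcl
          · rcases (PySem.Set.mem_add v s x).1 hadd with hv | hxs
            · exact Or.inl hv
            · subst hxs; exact Or.inr ⟨h1, fun c hc => hmemc c hc⟩
          · exact Or.inr hcl

-- A's reachable(c, p, set()) decides pvReaches
lemma pvReachA_iff (g : PySem.Dict Int (List Int)) (p c : Int) :
    (pvReachA g p (pvFuel g) c PySem.Set.empty).1 = true ↔ pvReaches g c p := by
  have hL : (pvNodes g).card ≤ (g.items.map (fun p => p.2.length + 1)).sum := by
    refine (List.toFinset_card_le _).trans ?_
    simp [List.length_flatMap]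
  have hU : ∀ x d, d ∈ g.getD x [] → d ∈ insert c (pvNodes g) := by
    intro x d h
    exact Finset.mem_insert_of_mem (pvNodes_closed g x d h)
  have hcU : c ∈ insert c (pvNodes g) := Finset.mem_insert_self _ _
  have hfilter : ((insert c (pvNodes g)).filter (fun x => x ∉ PySem.Set.empty)) = insert c (pvNodes g) := by
    refine Finset.filter_true_of_mem ?_
    intro x _
    simp [PySem.Set.empty]
  have hFuelA : 1 + ((insert c (pvNodes g)).filter (fun x => x ∉ PySem.Set.empty)).card ≤ pvFuel g := by
    rw [hfilter]
    unfold pvFuel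
    have := Finset.card_insert_le c (pvNodes g)
    omega
  constructor
  · exact pvReachA_sound g p (pvFuel g) c PySem.Set.empty
  · intro hr
    by_contra hfalse
    have hfalse' : (pvReachA g p (pvFuel g) c PySem.Set.empty).1 = false := by
      cases hb : (pvReachA g p (pvFuel g) c PySem.Set.empty).1
      · rfl
      · exact absurd hb hfalse
    obtain ⟨hs, hgood⟩ := pvReachA_false g p (insert c (pvNodes g)) hU (pvFuel g) c PySem.Set.empty hcU hFuelA hfalse'
    refine pv_closed_no_reach g p (pvReachA g p (pvFuel g) c PySem.Set.empty).2 ?_ c hr hs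
    intro y hy
    rcases hgood.2 y hy with h | h
    · simp [PySem.Set.empty] at h
    · exact h

-- strict (≥ 1 edge) reachability, which B's reach sets represent
def pvReachesP (g : PySem.Dict Int (List Int)) (u v : Int) : Prop :=
  ∃ w ∈ g.getD u [], pvReaches g w v

lemma pv_reaches_iff (g : PySem.Dict Int (List Int)) (u v : Int) :
    pvReaches g u v ↔ u = v ∨ pvReachesP g u v := by
  constructor
  · intro h
    cases h with
    | refl => exact Or.inl rfl
    | step hmem h => exact Or.inr ⟨_, hmem, h⟩
  · intro h
    rcases h with h | ⟨w, hmem, h⟩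
    · exact h ▸ .refl _
    · exact .step hmem h

-- edges of g.modify p [] (· ++ [c])
lemma pv_getD_addEdge (g : PySem.Dict Int (List Int)) (p c u : Int) :
    (g.modify p [] (fun l => l ++ [c])).getD u []
      = if u = p then g.getD p [] ++ [c] else g.getD u [] :=
  PySem.Dict.getD_modify g p u [] _

lemma pvReaches_mono {g g' : PySem.Dict Int (List Int)}
    (hsub : ∀ x b, b ∈ g.getD x [] → b ∈ g'.getD x []) {u v : Int}
    (h : pvReaches g u v) : pvReaches g' u v := by
  induction h with
  | refl a => exact .refl a
  | step hmem _ ih => exact .step (hsub _ _ hmem) ih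

lemma pv_addEdge_sub (g : PySem.Dict Int (List Int)) (p c : Int) :
    ∀ x b, b ∈ g.getD x [] → b ∈ (g.modify p [] (fun l => l ++ [c])).getD x [] := by
  intro x b hb
  rw [pv_getD_addEdge]
  split_ifs with h
  · subst h; exact List.mem_append_left _ hb
  · exact hb

-- transitive closure after adding the edge p → c (no cycle through it: ¬ c ⇝ p)
lemma pv_reaches_addEdge (g : PySem.Dict Int (List Int)) (p c : Int)
    (hcp : ¬ pvReaches g c p) (u v : Int) :
    pvReaches (g.modify p [] (fun l => l ++ [c])) u v
      ↔ pvReaches g u v ∨ (pvReaches g u p ∧ pvReaches g c v) := by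
  constructor
  · intro h
    induction h with
    | refl a => exact Or.inl (.refl a)
    | @step a b _ hmem _ ih =>
      rw [pv_getD_addEdge] at hmem
      by_cases hap : a = p
      · subst hap
        rw [if_pos rfl] at hmem
        rcases List.mem_append.1 hmem with hb | hb
        · rcases ih with h | ⟨h1, h2⟩
          · exact Or.inl (.step hb h)
          · exact Or.inr ⟨.step hb h1, h2⟩
        · have hbc : b = c := by simpa using hb
          subst hbc
          rcases ih with h | ⟨h1, h2⟩
          · exact Or.inr ⟨.refl a, h⟩
          · exact absurd h1 hcp
      · rw [if_neg hap] at hmem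
        rcases ih with h | ⟨h1, h2⟩
        · exact Or.inl (.step hmem h)
        · exact Or.inr ⟨.step hmem h1, h2⟩
  · intro h
    rcases h with h | ⟨h1, h2⟩
    · exact pvReaches_mono (pv_addEdge_sub g p c) h
    · refine pvReaches_trans (pvReaches_mono (pv_addEdge_sub g p c) h1) ?_
      refine pvReaches.step ?_ (pvReaches_mono (pv_addEdge_sub g p c) h2)
      rw [pv_getD_addEdge]
      simp

-- strict reachability after adding the edge
lemma pv_reachesP_addEdge (g : PySem.Dict Int (List Int)) (p c : Int)
    (hcp : ¬ pvReaches g c p) (u v : Int) :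
    pvReachesP (g.modify p [] (fun l => l ++ [c])) u v
      ↔ pvReachesP g u v ∨ ((u = p ∨ pvReachesP g u p) ∧ (v = c ∨ pvReachesP g c v)) := by
  have hvc : ∀ x, pvReaches g x v ↔ x = v ∨ pvReachesP g x v := fun x => pv_reaches_iff g x v
  constructor
  · rintro ⟨w, hmem, hw⟩
    rw [pv_getD_addEdge] at hmem
    rw [pv_reaches_addEdge g p c hcp] at hw
    by_cases hup : u = p
    · rw [if_pos hup] at hmem
      rcases List.mem_append.1 hmem with hb | hb
      · rcases hw with h | ⟨h1, h2⟩
        · exact Or.inl ⟨w, hup ▸ hb, h⟩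
        · refine Or.inr ⟨Or.inl hup, ?_⟩
          rw [pv_reaches_iff] at h2
          exact h2.imp Eq.symm id
      · have hwc : w = c := by simpa using hb
        subst hwc
        rcases hw with h | ⟨h1, h2⟩
        · refine Or.inr ⟨Or.inl hup, ?_⟩
          rw [pv_reaches_iff] at h
          exact h.imp Eq.symm id
        · exact absurd h1 hcp
    · rw [if_neg hup] at hmem
      rcases hw with h | ⟨h1, h2⟩
      · exact Or.inl ⟨w, hmem, h⟩
      · refine Or.inr ⟨Or.inr ⟨w, hmem, h1⟩, ?_⟩
        rw [pv_reaches_iff] at h2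
        exact h2.imp Eq.symm id
  · intro h
    rcases h with ⟨w, hmem, hw⟩ | ⟨h1, h2⟩
    · exact ⟨w, pv_addEdge_sub g p c u w hmem,
        pvReaches_mono (pv_addEdge_sub g p c) hw⟩
    · have hcv : pvReaches g c v := by
        rw [pv_reaches_iff]
        exact h2.imp Eq.symm id
      have hcv' : pvReaches (g.modify p [] (fun l => l ++ [c])) c v :=
        pvReaches_mono (pv_addEdge_sub g p c) hcv
      have hedge : c ∈ (g.modify p [] (fun l => l ++ [c])).getD p [] := by
        rw [pv_getD_addEdge]; simp
      rcases h1 with h1 | ⟨w, hmem, hw⟩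
      · exact ⟨c, h1 ▸ hedge, hcv'⟩
      · exact ⟨w, pv_addEdge_sub g p c u w hmem,
          pvReaches_trans (pvReaches_mono (pv_addEdge_sub g p c) hw)
            (.step hedge hcv')⟩

-- value-wise rebuild of the dict (B's comprehension): lookups are mapped
lemma pv_get?_mapval (p : Int) (nw : PySem.Set Int) (d : PySem.Dict Int (PySem.Set Int)) (k : Int) :
    (PySem.Dict.mk (d.items.map
        (fun us => (us.1, if p ∈ us.2 then PySem.Set.union us.2 nw else us.2)))).get? k
      = (d.get? k).map (fun s => if p ∈ s then PySem.Set.union s nw else s) := by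
  obtain ⟨l⟩ := d
  induction l with
  | nil => rfl
  | cons a l ih =>
    obtain ⟨ka, va⟩ := a
    show (PySem.Dict.mk ((ka, if p ∈ va then PySem.Set.union va nw else va) :: _)).get? k = _
    rw [PySem.Dict.get?_mk_cons, PySem.Dict.get?_mk_cons]
    by_cases hk : ka == k
    · simp [hk]
    · simp only [hk, Bool.false_eq_true, if_false]
      exact ih

lemma pv_getD_mapval (p : Int) (nw : PySem.Set Int) (d : PySem.Dict Int (PySem.Set Int)) (k : Int) :
    (PySem.Dict.mk (d.items.map
        (fun us => (us.1, if p ∈ us.2 then PySem.Set.union us.2 nw else us.2)))).getD k PySem.Set.empty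
      = if p ∈ d.getD k PySem.Set.empty then PySem.Set.union (d.getD k PySem.Set.empty) nw
        else d.getD k PySem.Set.empty := by
  rw [PySem.Dict.getD_eq_get?_getD, PySem.Dict.getD_eq_get?_getD, pv_get?_mapval]
  cases d.get? k with
  | none => simp [PySem.Set.empty]
  | some s => simp

-- membership in B's updated closure dict
lemma pv_mem_closeStep (reach : PySem.Dict Int (PySem.Set Int)) (p c u v : Int) :
    v ∈ (pvCloseStep reach p c).getD u PySem.Set.empty
      ↔ v ∈ reach.getD u PySem.Set.empty
        ∨ ((u = p ∨ p ∈ reach.getD u PySem.Set.empty)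
            ∧ (v = c ∨ v ∈ reach.getD c PySem.Set.empty)) := by
  have hnw : ∀ x : Int,
      x ∈ PySem.Set.union (PySem.Set.add PySem.Set.empty c) (reach.getD c PySem.Set.empty)
        ↔ x = c ∨ x ∈ reach.getD c PySem.Set.empty := by
    intro x
    rw [PySem.Set.mem_union, PySem.Set.mem_add]
    simp [PySem.Set.empty]
  unfold pvCloseStep
  simp only [PySem.Dict.getD_insert, pv_getD_mapval]
  by_cases hup : u = p
  · subst hup
    rw [if_pos rfl]
    split_ifs with h2 <;> simp only [PySem.Set.mem_union, hnw] <;> tauto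
  · rw [if_neg hup]
    split_ifs with h2 <;> (try simp only [PySem.Set.mem_union, hnw]) <;> tauto

-- the simulation invariant: reach[u] is exactly strict reachability in g
def pvInv (g : PySem.Dict Int (List Int)) (reach : PySem.Dict Int (PySem.Set Int)) : Prop :=
  ∀ u v, v ∈ reach.getD u PySem.Set.empty ↔ pvReachesP g u v

lemma pvInv_step (g : PySem.Dict Int (List Int)) (reach : PySem.Dict Int (PySem.Set Int))
    (hinv : pvInv g reach) (p c : Int) (hcp : ¬ pvReaches g c p) :
    pvInv (g.modify p [] (fun l => l ++ [c])) (pvCloseStep reach p c) := by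
  intro u v
  rw [pv_mem_closeStep, pv_reachesP_addEdge g p c hcp, hinv, hinv, hinv]

-- the two folds produce the same accepted list, step by step
lemma pv_fold_eq : ∀ (edges : List (Int × Int)) (good : List (Int × Int))
    (g : PySem.Dict Int (List Int)) (reach : PySem.Dict Int (PySem.Set Int)),
    pvInv g reach →
    (edges.foldl
      (fun (st : List (Int × Int) × PySem.Dict Int (List Int)) e =>
        if (pvReachA st.2 e.1 (pvFuel st.2) e.2 PySem.Set.empty).1 = false
        then (st.1 ++ [e], st.2.modify e.1 [] (fun l => l ++ [e.2]))
        else st) (good, g)).1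
    = (edges.foldl
      (fun (st : List (Int × Int) × PySem.Dict Int (PySem.Set Int)) e =>
        if e.1 = e.2 ∨ e.1 ∈ st.2.getD e.2 PySem.Set.empty then st
        else (st.1 ++ [e], pvCloseStep st.2 e.1 e.2)) (good, reach)).1 := by
  intro edges
  induction edges with
  | nil => intro good g reach _; rfl
  | cons e edges ih =>
    intro good g reach hinv
    obtain ⟨p, c⟩ := e
    simp only [List.foldl_cons]
    have hskip : (p = c ∨ p ∈ reach.getD c PySem.Set.empty) ↔ pvReaches g c p := by
      rw [hinv c p, pv_reaches_iff]
      constructor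
      · exact fun h => h.imp Eq.symm id
      · exact fun h => h.imp Eq.symm id
    by_cases hr : pvReaches g c p
    · have hA : ¬ ((pvReachA g p (pvFuel g) c PySem.Set.empty).1 = false) := by
        rw [(pvReachA_iff g p c).2 hr]
        simp
      rw [if_neg hA, if_pos (hskip.2 hr)]
      exact ih good g reach hinv
    · have hA : (pvReachA g p (pvFuel g) c PySem.Set.empty).1 = false := by
        cases hb : (pvReachA g p (pvFuel g) c PySem.Set.empty).1
        · rfl
        · exact absurd ((pvReachA_iff g p c).1 hb) hr
      rw [if_pos hA, if_neg (fun h => hr (hskip.1 h))]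
      exact ih _ _ _ (pvInv_step g reach hinv p c hr)

-- ===== VERDICT (by name: the statement is the Claim_ definition above) =====
theorem acyclic_edges_py_spec : Claim_equal_acyclic_edges_py := by
  intro raw_edges _
  unfold Spec_acyclic_edges_py acyclic_edges_py acyclic_edges_py_alt
  exact pv_fold_eq raw_edges [] PySem.Dict.empty PySem.Dict.empty
    (by intro u v; simp [PySem.Set.empty, pvReachesP, PySem.Dict.getD, PySem.Dict.get?, PySem.Dict.empty])
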